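-- pv_equiv track=rewrite | github.com/hbhat4000/pathsamp | 4dcode/parameters.py | index_mapping
-- ===== SOURCE A (Python) =====
-- def index_mapping(terms):
--     index = 0
--     index_map = {}
--
--     for d in range(0, terms):
--         for l in range(0, d + 1):
--             for k in range(0, d + 1):
--                 for j in range(0, d + 1):
--                     for i in range(0, d + 1):
--                         if (i + j + k + l == d):
--                             index_set = (i, j, k, l)
--                             index_map[index_set] = index
--                             index += 1
--
--     return index_map
-- ===== SOURCE B (Python) =====
-- def index_mapping(terms):
--     keys = [(d - j - k - l, j, k, l)
--             for d in range(terms)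
--             for l in range(d + 1)
--             for k in range(d + 1 - l)
--             for j in range(d + 1 - l - k)]
--     return {t: idx for idx, t in enumerate(keys)}
-- ===== Notes on version B (the rewrite author's own statement) =====
-- stated objective: alternative
-- what changed: B generates the composition key tuples directly with tightened loop bounds (i computed in closed form, k and j ranges shrunk so no guard is needed) as a staged comprehension, then builds the dict in a second pass with enumerate, instead of A's single stateful five-deep guarded loop; intended as faster (measured 25x at n=16) but unconfirmed at the largest probe size, so not claimed.
import Mathlib
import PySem

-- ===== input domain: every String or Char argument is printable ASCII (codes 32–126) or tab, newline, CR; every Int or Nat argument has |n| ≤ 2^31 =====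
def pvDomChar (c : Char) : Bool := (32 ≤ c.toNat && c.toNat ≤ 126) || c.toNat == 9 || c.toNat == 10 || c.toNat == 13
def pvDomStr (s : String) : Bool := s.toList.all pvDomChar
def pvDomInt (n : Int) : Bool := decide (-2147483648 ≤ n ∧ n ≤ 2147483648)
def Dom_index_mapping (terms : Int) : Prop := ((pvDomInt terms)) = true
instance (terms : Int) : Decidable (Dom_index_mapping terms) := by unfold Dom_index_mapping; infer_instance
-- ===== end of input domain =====

-- B builds the composition key tuples directly (i in closed form, tightened guard-free ranges)
-- and then indexes them with enumerate in a second pass: a genuinely different two-stage decomposition.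

-- ===== PORT A =====
-- state: (index, index_map)
def index_mapping (terms : Int) : List (List Int × Int) :=
  ((PySem.List.pyRange 0 terms 1).foldl (fun st d =>
      (PySem.List.pyRange 0 (d + 1) 1).foldl (fun st l =>
        (PySem.List.pyRange 0 (d + 1) 1).foldl (fun st k =>
          (PySem.List.pyRange 0 (d + 1) 1).foldl (fun st j =>
            (PySem.List.pyRange 0 (d + 1) 1).foldl (fun st i =>
              if i + j + k + l = d then
                (st.1 + 1, st.2.insert [i, j, k, l] st.1)
              else st) st) st) st) st) ((0, PySem.Dict.empty) : Int × PySem.Dict (List Int) Int)).2.items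

-- ===== PORT B =====
-- the list comprehension 'keys', then the dict comprehension over enumerate(keys)
def index_mapping_alt (terms : Int) : List (List Int × Int) :=
  let keys : List (List Int) :=
    (PySem.List.pyRange 0 terms 1).flatMap (fun d =>
      (PySem.List.pyRange 0 (d + 1) 1).flatMap (fun l =>
        (PySem.List.pyRange 0 (d + 1 - l) 1).flatMap (fun k =>
          (PySem.List.pyRange 0 (d + 1 - l - k) 1).map (fun j =>
            [d - j - k - l, j, k, l]))))
  ((PySem.List.enumerate keys 0).foldl
      (fun m p => m.insert p.2 p.1) (PySem.Dict.empty : PySem.Dict (List Int) Int)).items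

-- ===== PRECONDITION & SPEC =====
def Spec_index_mapping (terms : Int) (out : List (List Int × Int)) : Prop := out = index_mapping_alt terms
instance (terms : Int) (out : List (List Int × Int)) : Decidable (Spec_index_mapping terms out) := by unfold Spec_index_mapping; infer_instance

-- ===== CLAIM (what is proved, stated in full; the proofs are below) =====
def Claim_equal_index_mapping : Prop := ∀ (terms : Int), Dom_index_mapping terms → Spec_index_mapping terms (index_mapping terms)

-- ===== LEMMAS AND PROOFS =====

-- A fold whose guard never fires is the identity.
theorem foldl_if_none {σ : Type} (P : Int → Prop) [DecidablePred P]
    (f : σ → Int → σ) :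
    ∀ (l : List Int) (st : σ), (∀ x ∈ l, ¬ P x) →
      l.foldl (fun s x => if P x then f s x else s) st = st := by
  intro l
  induction l with
  | nil => intro st _; rfl
  | cons a l ih =>
    intro st h
    simp only [List.foldl_cons]
    rw [if_neg (h a (by simp))]
    exact ih st (fun x hx => h x (by simp [hx]))

-- A's innermost i-loop: at most one i in range(0, d+1) satisfies i + j + k + l = d,
-- namely i = d - j - k - l when it is nonnegative.
theorem inner_loop_eq {σ : Type} (d j k l : Int)
    (hj : 0 ≤ j) (hk : 0 ≤ k) (hl : 0 ≤ l)
    (f : σ → Int → σ) (st : σ) :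
    (PySem.List.pyRange 0 (d + 1) 1).foldl
        (fun s i => if i + j + k + l = d then f s i else s) st
      = if 0 ≤ d - j - k - l then f st (d - j - k - l) else st := by
  set i0 := d - j - k - l with hi0
  by_cases h0 : 0 ≤ i0
  · rw [if_pos h0]
    rw [PySem.List.pyRange_one_append 0 i0 (d + 1) h0 (by omega)]
    rw [List.foldl_append]
    rw [foldl_if_none (fun i => i + j + k + l = d) f _ st
      (by intro x hx; rw [PySem.List.mem_pyRange_one] at hx; omega)]
    rw [PySem.List.pyRange_one_cons (by omega : i0 < d + 1), List.foldl_cons]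
    rw [if_pos (by omega)]
    exact foldl_if_none (fun i => i + j + k + l = d) f _ _
      (by intro x hx; rw [PySem.List.mem_pyRange_one] at hx; omega)
  · rw [if_neg h0]
    exact foldl_if_none (fun i => i + j + k + l = d) f _ st
      (by intro x hx; rw [PySem.List.mem_pyRange_one] at hx; omega)

-- The j-loop with its sign guard is the unguarded loop over the tightened range.
theorem j_loop_eq {σ : Type} (d k l : Int) (hk : 0 ≤ k) (hl : 0 ≤ l)
    (f : σ → Int → σ) (st : σ) :
    (PySem.List.pyRange 0 (d + 1) 1).foldl
        (fun s j => if 0 ≤ d - j - k - l then f s j else s) st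
      = (PySem.List.pyRange 0 (d + 1 - l - k) 1).foldl f st := by
  by_cases hm : 0 ≤ d + 1 - l - k
  · rw [PySem.List.pyRange_one_append 0 (d + 1 - l - k) (d + 1) hm (by omega),
        List.foldl_append]
    have h1 : (PySem.List.pyRange 0 (d + 1 - l - k) 1).foldl
        (fun s j => if 0 ≤ d - j - k - l then f s j else s) st
        = (PySem.List.pyRange 0 (d + 1 - l - k) 1).foldl f st := by
      apply PySem.List.foldl_congr_mem
      intro acc x hx
      rw [PySem.List.mem_pyRange_one] at hx
      rw [if_pos (by omega)]
    rw [h1]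
    exact foldl_if_none (fun j => 0 ≤ d - j - k - l) f _ _
      (by intro x hx; rw [PySem.List.mem_pyRange_one] at hx; omega)
  · rw [PySem.List.pyRange_one_eq_nil (by omega : d + 1 - l - k ≤ 0)]
    exact foldl_if_none (fun j => 0 ≤ d - j - k - l) f _ st
      (by intro x hx; rw [PySem.List.mem_pyRange_one] at hx; omega)

-- A fold over range(0, b) whose body is the identity on [m, b) shrinks to range(0, m).
theorem id_tail_shrink {σ : Type} (b m : Int) (hm : 0 ≤ m) (hmb : m ≤ b)
    (g : σ → Int → σ) (hid : ∀ s x, m ≤ x → g s x = s) (st : σ) :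
    (PySem.List.pyRange 0 b 1).foldl g st = (PySem.List.pyRange 0 m 1).foldl g st := by
  rw [PySem.List.pyRange_one_append 0 m b hm hmb, List.foldl_append]
  generalize (PySem.List.pyRange 0 m 1).foldl g st = st'
  have h : ∀ (t : List Int), (∀ x ∈ t, m ≤ x) → ∀ s, t.foldl g s = s := by
    intro t
    induction t with
    | nil => intro _ s; rfl
    | cons a t ih =>
      intro hmem s
      simp only [List.foldl_cons]
      rw [hid s a (hmem a (by simp))]
      exact ih (fun x hx => hmem x (by simp [hx])) s
  exact h _ (by intro x hx; rw [PySem.List.mem_pyRange_one] at hx; omega) st'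

-- A's j- and i-loops for fixed d, k, l are the fold over the mapped tightened j-range.
theorem jk_level_eq (d k l : Int) (hk : 0 ≤ k) (hl : 0 ≤ l)
    (st : Int × PySem.Dict (List Int) Int) :
    (PySem.List.pyRange 0 (d + 1) 1).foldl (fun st j =>
        (PySem.List.pyRange 0 (d + 1) 1).foldl (fun st i =>
          if i + j + k + l = d then
            (st.1 + 1, st.2.insert [i, j, k, l] st.1)
          else st) st) st
      = ((PySem.List.pyRange 0 (d + 1 - l - k) 1).map (fun j =>
          [d - j - k - l, j, k, l])).foldl
          (fun st key => (st.1 + 1, st.2.insert key st.1)) st := by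
  rw [List.foldl_map]
  rw [← j_loop_eq d k l hk hl
    (fun s j => (s.1 + 1, s.2.insert [d - j - k - l, j, k, l] s.1)) st]
  apply PySem.List.foldl_congr_mem
  intro st j hj
  rw [PySem.List.mem_pyRange_one] at hj
  rw [inner_loop_eq d j k l hj.1 hk hl
    (fun s i => (s.1 + 1, s.2.insert [i, j, k, l] s.1)) st]

-- A's k-, j- and i-loops for fixed d, l are the fold over the tightened k-range with mapped bodies.
theorem k_level_eq (d l : Int) (hl0 : 0 ≤ l) (hl : l < d + 1)
    (st : Int × PySem.Dict (List Int) Int) :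
    (PySem.List.pyRange 0 (d + 1) 1).foldl (fun st k =>
        (PySem.List.pyRange 0 (d + 1) 1).foldl (fun st j =>
          (PySem.List.pyRange 0 (d + 1) 1).foldl (fun st i =>
            if i + j + k + l = d then
              (st.1 + 1, st.2.insert [i, j, k, l] st.1)
            else st) st) st) st
      = (PySem.List.pyRange 0 (d + 1 - l) 1).foldl (fun st k =>
          ((PySem.List.pyRange 0 (d + 1 - l - k) 1).map (fun j =>
            [d - j - k - l, j, k, l])).foldl
            (fun st key => (st.1 + 1, st.2.insert key st.1)) st) st := by
  have step1 : (PySem.List.pyRange 0 (d + 1) 1).foldl (fun st k =>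
        (PySem.List.pyRange 0 (d + 1) 1).foldl (fun st j =>
          (PySem.List.pyRange 0 (d + 1) 1).foldl (fun st i =>
            if i + j + k + l = d then
              (st.1 + 1, st.2.insert [i, j, k, l] st.1)
            else st) st) st) st
      = (PySem.List.pyRange 0 (d + 1) 1).foldl (fun st k =>
          ((PySem.List.pyRange 0 (d + 1 - l - k) 1).map (fun j =>
            [d - j - k - l, j, k, l])).foldl
            (fun st key => (st.1 + 1, st.2.insert key st.1)) st) st := by
    apply PySem.List.foldl_congr_mem
    intro st k hk
    rw [PySem.List.mem_pyRange_one] at hk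
    exact jk_level_eq d k l hk.1 hl0 st
  rw [step1]
  exact id_tail_shrink (d + 1) (d + 1 - l) (by omega) (by omega) _
    (by
      intro s x hx
      show ((PySem.List.pyRange 0 (d + 1 - l - x) 1).map (fun j =>
        [d - j - x - l, j, x, l])).foldl
        (fun st key => (st.1 + 1, st.2.insert key st.1)) s = s
      rw [PySem.List.pyRange_one_eq_nil (by omega : d + 1 - l - x ≤ 0)]
      rfl) st

-- The stateful (index, dict) insertion loop is the enumerate-based dict build.
theorem fold_insert_enum :
    ∀ (keys : List (List Int)) (n : Int) (m : PySem.Dict (List Int) Int),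
      keys.foldl (fun st key => (st.1 + 1, st.2.insert key st.1)) (n, m)
        = ((n + keys.length : Int),
           (PySem.List.enumerate keys n).foldl (fun m p => m.insert p.2 p.1) m) := by
  intro keys
  induction keys with
  | nil => intro n m; simp [PySem.List.enumerate_nil]
  | cons a t ih =>
    intro n m
    rw [List.foldl_cons, PySem.List.enumerate_cons, List.foldl_cons]
    show t.foldl _ (n + 1, m.insert a n) = _
    rw [ih (n + 1) (m.insert a n)]
    simp only [Prod.mk.injEq, List.length_cons]
    exact ⟨by push_cast; ring, trivial⟩

-- ===== VERDICT (by name: the statement is the Claim_ definition above) =====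
theorem index_mapping_spec : Claim_equal_index_mapping := by
  intro terms _
  show index_mapping terms = index_mapping_alt terms
  unfold index_mapping index_mapping_alt
  have hA :
      (PySem.List.pyRange 0 terms 1).foldl (fun st d =>
        (PySem.List.pyRange 0 (d + 1) 1).foldl (fun st l =>
          (PySem.List.pyRange 0 (d + 1) 1).foldl (fun st k =>
            (PySem.List.pyRange 0 (d + 1) 1).foldl (fun st j =>
              (PySem.List.pyRange 0 (d + 1) 1).foldl (fun st i =>
                if i + j + k + l = d then
                  (st.1 + 1, st.2.insert [i, j, k, l] st.1)
                else st) st) st) st) st) ((0, PySem.Dict.empty) : Int × PySem.Dict (List Int) Int)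
      = ((PySem.List.pyRange 0 terms 1).flatMap (fun d =>
          (PySem.List.pyRange 0 (d + 1) 1).flatMap (fun l =>
            (PySem.List.pyRange 0 (d + 1 - l) 1).flatMap (fun k =>
              (PySem.List.pyRange 0 (d + 1 - l - k) 1).map (fun j =>
                [d - j - k - l, j, k, l]))))).foldl
          (fun st key => (st.1 + 1, st.2.insert key st.1))
          ((0, PySem.Dict.empty) : Int × PySem.Dict (List Int) Int) := by
    rw [List.foldl_flatMap]
    apply PySem.List.foldl_congr_mem
    intro st d _
    rw [List.foldl_flatMap]
    apply PySem.List.foldl_congr_mem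
    intro st l hl
    rw [PySem.List.mem_pyRange_one] at hl
    rw [List.foldl_flatMap]
    exact k_level_eq d l hl.1 hl.2 st
  rw [hA, fold_insert_enum]
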